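-- pv_equiv track=rewrite | github.com/ThalKod/projet_validation | Graph.py | next
-- ===== SOURCE A (Python) =====
-- def next(c):
--     newV =[]
--     res=[]
--     n = 0
--     copy = c
--
--     for i in range(len(copy)):
--         for j in range(len(c)):
--             if i == j:
--                 if copy[i] == 0:
--                     n = 1
--                 else:
--                     n = 0
--                 newV.append(n)
--             else:
--                 newV.append(c[j])
--         res.append(newV)
--         newV = []
--     return res
-- ===== SOURCE B (Python) =====
-- def next(c):
--     res = []
--     prefix = []
--     rest = c
--     while rest:
--         head, rest = rest[0], rest[1:]
--         res.append(prefix + [1 if head == 0 else 0] + rest)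
--         prefix = prefix + [head]
--     return res
-- ===== Notes on version B (the rewrite author's own statement) =====
-- stated objective: alternative
-- what changed: Replaces A's indexed nested loops (inner j-loop with an i==j test) by a single-pass zipper: walk the list once maintaining a prefix accumulator and the remaining suffix, emitting each row as prefix + flipped head + suffix; no indices or index comparisons remain.
import Mathlib
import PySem

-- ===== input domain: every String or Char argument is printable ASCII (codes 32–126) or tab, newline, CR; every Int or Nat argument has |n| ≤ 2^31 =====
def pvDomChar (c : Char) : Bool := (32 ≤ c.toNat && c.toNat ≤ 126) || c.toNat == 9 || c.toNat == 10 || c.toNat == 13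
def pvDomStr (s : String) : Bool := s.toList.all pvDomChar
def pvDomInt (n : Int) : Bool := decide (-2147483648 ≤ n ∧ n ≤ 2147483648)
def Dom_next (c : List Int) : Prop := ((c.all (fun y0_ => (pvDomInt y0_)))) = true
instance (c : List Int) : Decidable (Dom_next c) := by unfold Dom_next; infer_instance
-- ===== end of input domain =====

-- B replaces A's indexed nested loops by a single-pass zipper (prefix accumulator +
-- remaining suffix; each row is prefix ++ flipped head ++ suffix); same quadratic
-- cost, a different decomposition without indices.


-- ===== PORT A =====
-- for i in range(len(c)): inner loop over j appending flip at i==j, else c[j]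
def next (c : List Int) : List (List Int) :=
  (PySem.List.pyRange 0 (c.length : Int) 1).foldl
    (fun res i =>
      res ++ [(PySem.List.pyRange 0 (c.length : Int) 1).foldl
        (fun newV j =>
          if i == j then
            newV ++ [if PySem.List.pyGetD c i 0 == 0 then (1 : Int) else 0]
          else
            newV ++ [PySem.List.pyGetD c j 0]) []]) []

-- ===== PORT B =====
-- zipper pass: while rest: emit prefix + [flipped head] + rest; prefix gains the head
def nextAltGo (pre : List Int) : List Int → List (List Int) → List (List Int)
  | [], res => res
  | x :: rest, res =>
      nextAltGo (pre ++ [x]) rest (res ++ [pre ++ [if x == 0 then (1 : Int) else 0] ++ rest])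

def next_alt (c : List Int) : List (List Int) := nextAltGo [] c []

-- ===== PRECONDITION & SPEC =====
def Spec_next (c : List Int) (out : List (List Int)) : Prop := out = next_alt c
instance (c : List Int) (out : List (List Int)) : Decidable (Spec_next c out) := by unfold Spec_next; infer_instance

-- ===== CLAIM (what is proved, stated in full; the proofs are below) =====
def Claim_equal_next : Prop := ∀ (c : List Int), Dom_next c → Spec_next c (next c)

-- ===== LEMMAS AND PROOFS =====

-- A's inner row for index i is c with position i overwritten by v.
lemma row_id (xs : List Int) :
    (List.range xs.length).map (fun j => xs.getD j 0) = xs := by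
  induction xs with
  | nil => simp
  | cons x xs ih =>
    rw [List.length_cons, List.range_succ_eq_map, List.map_cons, List.map_map]
    simp only [Function.comp_def, List.getD_cons_zero, List.getD_cons_succ]
    rw [ih]

lemma row_eq_set (c : List Int) (i : Nat) (v : Int) :
    (List.range c.length).map (fun j => if i = j then v else c.getD j 0) = c.set i v := by
  induction c generalizing i v with
  | nil => simp
  | cons x xs ih =>
    rw [List.length_cons, List.range_succ_eq_map, List.map_cons, List.map_map]
    cases i with
    | zero =>
      have h : ((fun j => if 0 = j then v else (x :: xs).getD j 0) ∘ Nat.succ)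
           = (fun j => xs.getD j 0) := by
        funext j; simp
      rw [h, row_id]
      simp
    | succ k =>
      have h : ((fun j => if k + 1 = j then v else (x :: xs).getD j 0) ∘ Nat.succ)
           = (fun j => if k = j then v else xs.getD j 0) := by
        funext j; simp [Function.comp]
      rw [h, ih]
      simp

-- B's zipper loop computes the same range-indexed family of one-flip rows.
lemma nextAltGo_eq (c : List Int) : ∀ (pre : List Int) (res : List (List Int)),
    nextAltGo pre c res = res ++ (List.range c.length).map
      (fun i => pre ++ c.set i (if c.getD i 0 == 0 then (1 : Int) else 0)) := by
  induction c with
  | nil => intro pre res; simp [nextAltGo]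
  | cons x xs ih =>
    intro pre res
    rw [List.length_cons, List.range_succ_eq_map, List.map_cons, List.map_map]
    simp only [nextAltGo, ih, Function.comp_def,
      List.getD_cons_zero, List.getD_cons_succ, List.set_cons_zero, List.set_cons_succ,
      List.append_assoc, List.singleton_append, List.cons_append, List.nil_append]

lemma next_alt_eq_map (c : List Int) :
    next_alt c = (List.range c.length).map
      (fun i => c.set i (if c.getD i 0 == 0 then (1 : Int) else 0)) := by
  simp [next_alt, nextAltGo_eq]

-- ===== VERDICT (by name: the statement is the Claim_ definition above) =====
theorem next_spec : Claim_equal_next := by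
  intro c _
  unfold Spec_next next
  rw [next_alt_eq_map]
  have hstep : ∀ i : Int,
      (fun (newV : List Int) (j : Int) =>
        if i == j then newV ++ [if PySem.List.pyGetD c i 0 == 0 then (1:Int) else 0]
        else newV ++ [PySem.List.pyGetD c j 0])
    = (fun (newV : List Int) (j : Int) =>
        newV ++ [if i == j then (if PySem.List.pyGetD c i 0 == 0 then (1:Int) else 0)
                 else PySem.List.pyGetD c j 0]) := by
    intro i; funext newV j; split_ifs <;> rfl
  simp only [hstep, PySem.List.foldl_append_singleton_eq_map,
    PySem.List.pyRange_one, List.map_map, Int.sub_zero, Int.toNat_natCast,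
    Function.comp_def, List.nil_append]
  apply List.map_congr_left
  intro k hk
  rw [List.mem_range] at hk
  have h : (fun j : Nat => if ((0 : Int) + (k:Int) == 0 + (j:Int)) then
            (if PySem.List.pyGetD c (0 + (k : Int)) 0 == 0 then (1:Int) else 0)
          else PySem.List.pyGetD c (0 + (j : Int)) 0)
       = (fun j : Nat => if k = j then (if c.getD k 0 == 0 then (1:Int) else 0) else c.getD j 0) := by
    funext j
    simp [PySem.List.pyGetD_natCast]
  rw [h, row_eq_set]
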